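-- pv_equiv track=rewrite | github.com/Fransandi/Advent-of-Code-Python-Solutions | 2024/solutions/day13.py | part_one
-- ===== SOURCE A (Python) =====
-- def parse_input(input):
--     machines = []
--     machine = []
--     for line in input:
--         line = line.replace(',', '').replace('=', ' ').replace('+', ' ')
--
--         if line.startswith('Button'):
--             instructions = line.split()
--             machine.append((int(instructions[3]), int(instructions[5])))
--
--         if line.startswith('Prize'):
--             instructions = line.split()
--             machine.append((int(instructions[2]), int(instructions[4])))
--             machines.append(machine)
--             machine = []
--
--     return machines
--
-- def part_one(input):
--     # Parse the input
--     machines = parse_input(input)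
--
--     # For each machine, we calculate the minimum cost
--     cost = 0
--     for machine in machines:
--         min_cost = float('inf')
--         (a_x, a_y), (b_x, b_y), target = machine
--
--         # Try all combinations of a_times and b_times
--         for a_times in range(101):
--             for b_times in range(101):
--                 # If it matches the target, we update the min cost
--                 if target == (a_x * a_times + b_x * b_times, a_y * a_times + b_y * b_times):
--                     min_cost = min(min_cost, 3 * a_times + b_times)
--
--         # If we can't make the target, we skip this machine
--         if min_cost == float('inf'):
--             continue
--
--         # Add the minimum cost to the total cost
--         cost += min_cost
--
--     return cost
-- ===== SOURCE B (Python) =====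
-- def _solve_b(bx, by, rx, ry):
--     # minimal b in 0..100 with bx*b == rx and by*b == ry, or None
--     if bx == 0 and by == 0:
--         return 0 if rx == 0 and ry == 0 else None
--     if bx != 0:
--         q, r = divmod(rx, bx)
--         if r != 0 or by * q != ry or not (0 <= q <= 100):
--             return None
--         return q
--     q, r = divmod(ry, by)
--     if r != 0 or bx * q != rx or not (0 <= q <= 100):
--         return None
--     return q
--
-- def part_one(input):
--     cost = 0
--     pending = []
--     for line in input:
--         line = line.replace(',', '').replace('=', ' ').replace('+', ' ')
--         if line.startswith('Button'):
--             t = line.split()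
--             pending.append((int(t[3]), int(t[5])))
--         elif line.startswith('Prize'):
--             t = line.split()
--             tx, ty = int(t[2]), int(t[4])
--             (ax, ay), (bx, by) = pending[0], pending[1]
--             pending = []
--             best = None
--             for a in range(101):
--                 b = _solve_b(bx, by, tx - ax * a, ty - ay * a)
--                 if b is not None:
--                     c = 3 * a + b
--                     if best is None or c < best:
--                         best = c
--             if best is not None:
--                 cost += best
--     return cost
-- ===== Notes on version B (the rewrite author's own statement) =====
-- stated objective: alternative
-- what changed: Replaces A's 101x101 brute-force scan over all (a,b) press counts per machine by a single loop over a that solves the linear equation for b directly (integer division with divisibility/consistency/range checks, handling the degenerate all-zero B button), interleaved with parsing in one pass.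
import Mathlib
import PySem

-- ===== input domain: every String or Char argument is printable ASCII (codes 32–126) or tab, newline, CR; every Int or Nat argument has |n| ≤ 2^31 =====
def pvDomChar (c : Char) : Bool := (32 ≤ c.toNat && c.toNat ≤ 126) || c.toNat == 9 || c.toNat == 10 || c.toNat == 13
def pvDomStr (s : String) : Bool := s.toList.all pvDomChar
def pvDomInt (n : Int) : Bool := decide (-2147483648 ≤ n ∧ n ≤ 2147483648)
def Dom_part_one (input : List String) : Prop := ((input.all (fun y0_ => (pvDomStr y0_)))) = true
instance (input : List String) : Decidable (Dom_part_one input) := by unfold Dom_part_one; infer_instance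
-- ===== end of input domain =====

-- B replaces A's 101×101 brute-force scan per machine by a single loop over a that solves
-- the linear equation for b directly (objective: alternative algorithm).

-- shared parse micro-helpers (both Pythons perform the same replace/split/int() steps)
def lineT (s : String) : String :=
  PySem.Str.replace (PySem.Str.replace (PySem.Str.replace s "," "") "=" " ") "+" " "

-- int(tokens[i]); outside Pre_ Python raises (IndexError/ValueError), getD values are unclaimed
def tokInt (t : List String) (i : Int) : Int :=
  (PySem.Int.ofStr? (PySem.List.pyGetD t i "")).getD 0

-- ===== PORT A =====
def parse_input (input : List String) : List (List (Int × Int)) :=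
  (input.foldl (fun (st : List (List (Int × Int)) × List (Int × Int)) line =>
    let l := lineT line
    let st :=
      if PySem.Str.startswith l "Button" then
        let t := PySem.Str.split₀ l
        (st.1, st.2 ++ [(tokInt t 3, tokInt t 5)])
      else st
    if PySem.Str.startswith l "Prize" then
      let t := PySem.Str.split₀ l
      (st.1 ++ [st.2 ++ [(tokInt t 2, tokInt t 4)]], [])
    else st) ([], [])).1

def part_one (input : List String) : Int :=
  let machines := parse_input input
  machines.foldl (fun cost machine =>
    match machine with
    | [(aX, aY), (bX, bY), (tX, tY)] =>
      let minCost := (PySem.List.pyRange 0 101 1).foldl (fun mc a =>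
        (PySem.List.pyRange 0 101 1).foldl (fun mc b =>
          if tX = aX * a + bX * b ∧ tY = aY * a + bY * b then
            some (match mc with | none => 3 * a + b | some x => min x (3 * a + b))
          else mc) mc) (none : Option Int)
      match minCost with
      | none => cost
      | some mc => cost + mc
    | _ => cost  -- Python raises here (unpacking error); such inputs are outside Pre_
    ) 0

-- ===== PORT B =====
-- minimal b in 0..100 with bX*b = rX and bY*b = rY, or none
def solveB (bX bY rX rY : Int) : Option Int :=
  if bX = 0 ∧ bY = 0 then (if rX = 0 ∧ rY = 0 then some 0 else none)
  else if bX ≠ 0 then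
    match PySem.Int.divmod? rX bX with
    | none => none
    | some (q, r) => if r ≠ 0 ∨ bY * q ≠ rY ∨ ¬(0 ≤ q ∧ q ≤ 100) then none else some q
  else
    match PySem.Int.divmod? rY bY with
    | none => none
    | some (q, r) => if r ≠ 0 ∨ bX * q ≠ rX ∨ ¬(0 ≤ q ∧ q ≤ 100) then none else some q

def part_one_alt (input : List String) : Int :=
  (input.foldl (fun (st : Int × List (Int × Int)) line =>
    let l := lineT line
    if PySem.Str.startswith l "Button" then
      let t := PySem.Str.split₀ l
      (st.1, st.2 ++ [(tokInt t 3, tokInt t 5)])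
    else if PySem.Str.startswith l "Prize" then
      let t := PySem.Str.split₀ l
      let tX := tokInt t 2
      let tY := tokInt t 4
      let p0 := (PySem.List.pyGet? st.2 0).getD (0, 0)
      let p1 := (PySem.List.pyGet? st.2 1).getD (0, 0)
      let best := (PySem.List.pyRange 0 101 1).foldl (fun best a =>
        match solveB p1.1 p1.2 (tX - p0.1 * a) (tY - p0.2 * a) with
        | some b =>
          match best with
          | none => some (3 * a + b)
          | some v => if 3 * a + b < v then some (3 * a + b) else some v
        | none => best) (none : Option Int)
      ((match best with | none => st.1 | some v => st.1 + v), [])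
    else st) (0, [])).1

-- ===== PRECONDITION & SPEC =====
-- Pre_ = exactly the inputs on which Python A returns: every Button line (after the
-- replace-steps) has ≥6 whitespace tokens with tokens 3 and 5 int()-parsable, every Prize
-- line has ≥5 tokens with tokens 2 and 4 int()-parsable, and exactly 2 Button lines occur
-- before each Prize line since the previous Prize (else int()/indexing/unpacking raises).
def preAux : Nat → List String → Bool
  | _, [] => true
  | c, line :: rest =>
    let l := lineT line
    if PySem.Str.startswith l "Button" then
      let t := PySem.Str.split₀ l
      decide (6 ≤ t.length) && (PySem.Int.ofStr? (PySem.List.pyGetD t 3 "")).isSome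
        && (PySem.Int.ofStr? (PySem.List.pyGetD t 5 "")).isSome && preAux (c + 1) rest
    else if PySem.Str.startswith l "Prize" then
      let t := PySem.Str.split₀ l
      decide (5 ≤ t.length) && (PySem.Int.ofStr? (PySem.List.pyGetD t 2 "")).isSome
        && (PySem.Int.ofStr? (PySem.List.pyGetD t 4 "")).isSome && (c == 2) && preAux 0 rest
    else preAux c rest

def Pre_part_one (input : List String) : Prop := preAux 0 input = true
instance (input : List String) : Decidable (Pre_part_one input) := by
  unfold Pre_part_one; infer_instance

def pvWitness_part_one : List String :=
  ["Button A: X+2, Y+1", "Button B: X+1, Y+3", "Prize: X=7, Y=11"]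

def Spec_part_one (input : List String) (out : Int) : Prop := out = part_one_alt input
instance (input : List String) (out : Int) : Decidable (Spec_part_one input out) := by
  unfold Spec_part_one; infer_instance

-- ===== CLAIM (what is proved, stated in full; the proofs are below) =====
def Claim_equal_part_one : Prop :=
  ∀ (input : List String), Dom_part_one input → Pre_part_one input →
    Spec_part_one input (part_one input)

-- ===== LEMMAS AND PROOFS =====

-- named copies of the three loop bodies (rfl-equal to the ports' lambdas)
def pstep (st : List (List (Int × Int)) × List (Int × Int)) (line : String) :
    List (List (Int × Int)) × List (Int × Int) :=
  let l := lineT line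
  let st :=
    if PySem.Str.startswith l "Button" then
      let t := PySem.Str.split₀ l
      (st.1, st.2 ++ [(tokInt t 3, tokInt t 5)])
    else st
  if PySem.Str.startswith l "Prize" then
    let t := PySem.Str.split₀ l
    (st.1 ++ [st.2 ++ [(tokInt t 2, tokInt t 4)]], [])
  else st

def costStep (cost : Int) (machine : List (Int × Int)) : Int :=
  match machine with
  | [(aX, aY), (bX, bY), (tX, tY)] =>
    let minCost := (PySem.List.pyRange 0 101 1).foldl (fun mc a =>
      (PySem.List.pyRange 0 101 1).foldl (fun mc b =>
        if tX = aX * a + bX * b ∧ tY = aY * a + bY * b then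
          some (match mc with | none => 3 * a + b | some x => min x (3 * a + b))
        else mc) mc) (none : Option Int)
    match minCost with
    | none => cost
    | some mc => cost + mc
  | _ => cost

def bstep (st : Int × List (Int × Int)) (line : String) : Int × List (Int × Int) :=
  let l := lineT line
  if PySem.Str.startswith l "Button" then
    let t := PySem.Str.split₀ l
    (st.1, st.2 ++ [(tokInt t 3, tokInt t 5)])
  else if PySem.Str.startswith l "Prize" then
    let t := PySem.Str.split₀ l
    let tX := tokInt t 2
    let tY := tokInt t 4
    let p0 := (PySem.List.pyGet? st.2 0).getD (0, 0)
    let p1 := (PySem.List.pyGet? st.2 1).getD (0, 0)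
    let best := (PySem.List.pyRange 0 101 1).foldl (fun best a =>
      match solveB p1.1 p1.2 (tX - p0.1 * a) (tY - p0.2 * a) with
      | some b =>
        match best with
        | none => some (3 * a + b)
        | some v => if 3 * a + b < v then some (3 * a + b) else some v
      | none => best) (none : Option Int)
    ((match best with | none => st.1 | some v => st.1 + v), [])
  else st

lemma parse_input_eq (input : List String) :
    parse_input input = (input.foldl pstep ([], [])).1 := rfl

lemma part_one_eq (input : List String) :
    part_one input = (parse_input input).foldl costStep 0 := rfl

lemma part_one_alt_eq (input : List String) :
    part_one_alt input = (input.foldl bstep (0, [])).1 := rfl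

-- Python's min(mc, v) with mc possibly float('inf')
def optmin (m : Option Int) (v : Int) : Option Int :=
  some (match m with | none => v | some x => min x v)

lemma bstep_eq_optmin (m : Option Int) (v : Int) :
    (match m with
     | none => some v
     | some x => if v < x then some v else some x) = optmin m v := by
  cases m with
  | none => rfl
  | some x =>
    simp only [optmin]
    split_ifs with h <;> simp [min_def] <;> omega

lemma foldl_optmin_skip (p : Int → Prop) [DecidablePred p] (g : Int → Int) (l : List Int)
    (m : Option Int) (h : ∀ b ∈ l, ¬ p b) :
    l.foldl (fun mc b => if p b then optmin mc (g b) else mc) m = m := by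
  induction l generalizing m with
  | nil => rfl
  | cons x xs ih =>
    simp only [List.foldl_cons]
    rw [if_neg (h x (by simp))]
    exact ih m fun b hb => h b (by simp [hb])

lemma foldl_optmin_const (g : Int → Int) (l : List Int) (x : Int)
    (h : ∀ b ∈ l, x ≤ g b) :
    l.foldl (fun mc b => optmin mc (g b)) (some x) = some x := by
  induction l with
  | nil => rfl
  | cons y ys ih =>
    simp only [List.foldl_cons, optmin]
    rw [min_eq_left (h y (by simp))]
    exact ih fun b hb => h b (by simp [hb])

lemma filter_eq_singleton_of_unique (p : Int → Prop) [DecidablePred p] (l : List Int)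
    (b0 : Int) (hnd : l.Nodup) (hmem : b0 ∈ l) (hiff : ∀ b ∈ l, p b ↔ b = b0) :
    l.filter (fun b => decide (p b)) = [b0] := by
  induction l with
  | nil => simp at hmem
  | cons x xs ih =>
    rcases List.nodup_cons.mp hnd with ⟨hx, hnd'⟩
    by_cases hx0 : x = b0
    · subst hx0
      have : xs.filter (fun b => decide (p b)) = [] := by
        apply List.filter_eq_nil_iff.mpr
        intro b hb
        simp only [decide_eq_true_eq]
        intro hpb
        exact hx ((hiff b (by simp [hb])).mp hpb ▸ hb)
      simp [(hiff x (by simp)).mpr rfl, this]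
    · have hmem' : b0 ∈ xs := by
        rcases List.mem_cons.mp hmem with h | h
        · exact absurd h.symm hx0
        · exact h
      have : ¬ p x := fun hpx => hx0 ((hiff x (by simp)).mp hpx)
      simp [this]
      exact ih hnd' hmem' fun b hb => hiff b (by simp [hb])

-- the b-loop over 0..100, abstracted on the residuals
lemma core_loop (bX bY rX rY c : Int) (m : Option Int) :
    (PySem.List.pyRange 0 101 1).foldl (fun mc b =>
        if bX * b = rX ∧ bY * b = rY then optmin mc (c + b) else mc) m =
      (match solveB bX bY rX rY with
       | some b => optmin m (c + b)
       | none => m) := by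
  by_cases h0 : bX = 0 ∧ bY = 0
  · obtain ⟨hx, hy⟩ := h0; subst hx; subst hy
    by_cases hr : rX = 0 ∧ rY = 0
    · obtain ⟨hrx, hry⟩ := hr; subst hrx; subst hry
      have hs : solveB 0 0 0 0 = some 0 := by simp [solveB]
      rw [hs]
      have hfun : (fun (mc : Option Int) (b : Int) =>
          if (0:Int) * b = 0 ∧ (0:Int) * b = 0 then optmin mc (c + b) else mc) =
          fun mc b => optmin mc (c + b) := by
        funext mc b; rw [if_pos ⟨by ring, by ring⟩]
      rw [hfun, PySem.List.pyRange_one_cons (by norm_num)]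
      simp only [List.foldl_cons]
      cases m with
      | none =>
        show (PySem.List.pyRange 1 101 1).foldl (fun mc b => optmin mc (c + b)) (some (c + 0)) = _
        rw [foldl_optmin_const _ _ _ (fun b hb => by
          have := (PySem.List.mem_pyRange_one.mp hb).1; omega)]
        rfl
      | some x =>
        show (PySem.List.pyRange 1 101 1).foldl (fun mc b => optmin mc (c + b))
            (some (min x (c + 0))) = _
        rw [foldl_optmin_const _ _ _ (fun b hb => by
          have := (PySem.List.mem_pyRange_one.mp hb).1
          have : c + 0 ≤ c + b := by omega
          exact le_trans (min_le_right _ _) this)]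
        rfl
    · have hs : solveB 0 0 rX rY = none := by
        simp [solveB, hr]
      rw [hs]
      exact foldl_optmin_skip _ _ _ m (fun b _ hb => by
        rcases hb with ⟨h1, h2⟩; rw [zero_mul] at h1 h2; exact hr ⟨h1.symm, h2.symm⟩)
  · by_cases hbx : bX = 0
    · have hby : bY ≠ 0 := fun h => h0 ⟨hbx, h⟩
      subst hbx
      have hdm : PySem.Int.divmod? rY bY =
          some (PySem.Int.floordiv rY bY, PySem.Int.mod rY bY) := by
        simp [PySem.Int.divmod?, PySem.Int.floordiv, PySem.Int.mod, hby]
      have hs : solveB 0 bY rX rY =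
          if PySem.Int.mod rY bY ≠ 0 ∨ (0:Int) * PySem.Int.floordiv rY bY ≠ rX ∨
             ¬(0 ≤ PySem.Int.floordiv rY bY ∧ PySem.Int.floordiv rY bY ≤ 100) then none
          else some (PySem.Int.floordiv rY bY) := by
        simp only [solveB, hdm]
        rw [if_neg (by simp [hby]), if_neg (by simp)]
      rw [hs]
      by_cases hr0 : PySem.Int.mod rY bY = 0
      · have hqy : bY * PySem.Int.floordiv rY bY = rY := by
          have h1 := PySem.Int.floordiv_mul_add_mod rY bY
          rw [mul_comm]; omega
        by_cases hx0 : (0:Int) * PySem.Int.floordiv rY bY = rX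
        · rw [zero_mul] at hx0
          by_cases hq100 : 0 ≤ PySem.Int.floordiv rY bY ∧ PySem.Int.floordiv rY bY ≤ 100
          · rw [if_neg (by push_neg; exact ⟨hr0, by rw [zero_mul]; exact hx0, hq100⟩)]
            rw [PySem.List.foldl_ite_eq_foldl_filter,
              filter_eq_singleton_of_unique _ _ (PySem.Int.floordiv rY bY)
                (PySem.List.nodup_pyRange_one 0 101)
                (PySem.List.mem_pyRange_one.mpr ⟨hq100.1, by omega⟩)
                (fun b _ => by
                  constructor
                  · rintro ⟨h1, h2⟩
                    exact mul_left_cancel₀ hby (by rw [hqy, h2])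
                  · rintro rfl
                    exact ⟨by rw [zero_mul]; exact hx0, hqy⟩)]
            simp [List.foldl]
          · rw [if_pos (by tauto)]
            exact foldl_optmin_skip _ _ _ m (fun b hb hpb => by
              have hbq : b = PySem.Int.floordiv rY bY :=
                mul_left_cancel₀ hby (by rw [hqy, hpb.2])
              have := PySem.List.mem_pyRange_one.mp hb
              exact hq100 (by omega))
        · rw [if_pos (by tauto)]
          exact foldl_optmin_skip _ _ _ m (fun b _ hpb => by
            rw [zero_mul] at hpb hx0
            exact hx0 hpb.1)
      · rw [if_pos (by tauto)]
        exact foldl_optmin_skip _ _ _ m (fun b _ hpb => by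
          have : bY ∣ rY := ⟨b, hpb.2.symm⟩
          exact hr0 ((PySem.Int.mod_eq_zero_iff_dvd rY bY).mpr this))
    · have hdm : PySem.Int.divmod? rX bX =
          some (PySem.Int.floordiv rX bX, PySem.Int.mod rX bX) := by
        simp [PySem.Int.divmod?, PySem.Int.floordiv, PySem.Int.mod, hbx]
      have hs : solveB bX bY rX rY =
          if PySem.Int.mod rX bX ≠ 0 ∨ bY * PySem.Int.floordiv rX bX ≠ rY ∨
             ¬(0 ≤ PySem.Int.floordiv rX bX ∧ PySem.Int.floordiv rX bX ≤ 100) then none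
          else some (PySem.Int.floordiv rX bX) := by
        simp only [solveB, hdm]
        rw [if_neg h0, if_pos hbx]
      rw [hs]
      by_cases hr0 : PySem.Int.mod rX bX = 0
      · have hqx : bX * PySem.Int.floordiv rX bX = rX := by
          have h1 := PySem.Int.floordiv_mul_add_mod rX bX
          rw [mul_comm]; omega
        by_cases hy : bY * PySem.Int.floordiv rX bX = rY
        · by_cases hq100 : 0 ≤ PySem.Int.floordiv rX bX ∧ PySem.Int.floordiv rX bX ≤ 100
          · rw [if_neg (by push_neg; exact ⟨hr0, hy, hq100⟩)]
            rw [PySem.List.foldl_ite_eq_foldl_filter,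
              filter_eq_singleton_of_unique _ _ (PySem.Int.floordiv rX bX)
                (PySem.List.nodup_pyRange_one 0 101)
                (PySem.List.mem_pyRange_one.mpr ⟨hq100.1, by omega⟩)
                (fun b _ => by
                  constructor
                  · rintro ⟨h1, h2⟩
                    exact mul_left_cancel₀ hbx (by rw [hqx, h1])
                  · rintro rfl
                    exact ⟨hqx, hy⟩)]
            simp [List.foldl]
          · rw [if_pos (by tauto)]
            exact foldl_optmin_skip _ _ _ m (fun b hb hpb => by
              have hbq : b = PySem.Int.floordiv rX bX :=
                mul_left_cancel₀ hbx (by rw [hqx, hpb.1])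
              have := PySem.List.mem_pyRange_one.mp hb
              exact hq100 (by omega))
        · rw [if_pos (by tauto)]
          exact foldl_optmin_skip _ _ _ m (fun b _ hpb => by
            have hbq : b = PySem.Int.floordiv rX bX :=
              mul_left_cancel₀ hbx (by rw [hqx, hpb.1])
            exact hy (hbq ▸ hpb.2))
      · rw [if_pos (by tauto)]
        exact foldl_optmin_skip _ _ _ m (fun b _ hpb => by
          have : bX ∣ rX := ⟨b, hpb.1.symm⟩
          exact hr0 ((PySem.Int.mod_eq_zero_iff_dvd rX bX).mpr this))

-- the inner b-loop of A computes exactly optmin of solveB's answer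
lemma inner_loop_eq_solveB (aX aY bX bY tX tY a : Int) (m : Option Int) :
    (PySem.List.pyRange 0 101 1).foldl (fun mc b =>
        if tX = aX * a + bX * b ∧ tY = aY * a + bY * b then optmin mc (3 * a + b)
        else mc) m =
      (match solveB bX bY (tX - aX * a) (tY - aY * a) with
       | some b => optmin m (3 * a + b)
       | none => m) := by
  have hc : ∀ b : Int, (tX = aX * a + bX * b ∧ tY = aY * a + bY * b) =
      (bX * b = tX - aX * a ∧ bY * b = tY - aY * a) := by
    intro b; apply propext; constructor <;> (intro ⟨h1, h2⟩; constructor <;> omega)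
  simp only [hc]
  exact core_loop bX bY (tX - aX * a) (tY - aY * a) (3 * a) m

-- A's machine cost equals B's machine cost
lemma machine_cost_eq (p0 p1 : Int × Int) (tX tY : Int) (c : Int) :
    costStep c [p0, p1, (tX, tY)] =
      (match (PySem.List.pyRange 0 101 1).foldl (fun best a =>
          match solveB p1.1 p1.2 (tX - p0.1 * a) (tY - p0.2 * a) with
          | some b =>
            match best with
            | none => some (3 * a + b)
            | some v => if 3 * a + b < v then some (3 * a + b) else some v
          | none => best) (none : Option Int) with
       | none => c
       | some v => c + v) := by
  obtain ⟨aX, aY⟩ := p0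
  obtain ⟨bX, bY⟩ := p1
  show (match (PySem.List.pyRange 0 101 1).foldl (fun mc a =>
      (PySem.List.pyRange 0 101 1).foldl (fun mc b =>
        if tX = aX * a + bX * b ∧ tY = aY * a + bY * b then optmin mc (3 * a + b)
        else mc) mc) (none : Option Int) with
    | none => c | some mc => c + mc) = _
  have houter : (PySem.List.pyRange 0 101 1).foldl (fun mc a =>
      (PySem.List.pyRange 0 101 1).foldl (fun mc b =>
        if tX = aX * a + bX * b ∧ tY = aY * a + bY * b then optmin mc (3 * a + b)
        else mc) mc) (none : Option Int) =
      (PySem.List.pyRange 0 101 1).foldl (fun best a =>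
        match solveB bX bY (tX - aX * a) (tY - aY * a) with
        | some b =>
          match best with
          | none => some (3 * a + b)
          | some v => if 3 * a + b < v then some (3 * a + b) else some v
        | none => best) (none : Option Int) := by
    apply PySem.List.foldl_congr_mem
    intro mc a _
    rw [inner_loop_eq_solveB aX aY bX bY tX tY a mc]
    cases solveB bX bY (tX - aX * a) (tY - aY * a) with
    | none => rfl
    | some b => exact (bstep_eq_optmin mc (3 * a + b)).symm
  rw [houter]

lemma not_prize_of_button (l : String)
    (h : PySem.Str.startswith l "Button" = true) :
    PySem.Str.startswith l "Prize" = false := by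
  by_contra hne
  rw [Bool.not_eq_false] at hne
  simp only [PySem.Str.startswith_eq] at h hne
  rcases (PySem.Chars.startswith_iff _ _).mp h with ⟨t1, e1⟩
  rcases (PySem.Chars.startswith_iff _ _).mp hne with ⟨t2, e2⟩
  rw [← e1] at e2
  simp at e2

lemma costStep_shift (m : List (Int × Int)) (c : Int) :
    costStep c m = c + costStep 0 m := by
  unfold costStep
  rcases m with _ | ⟨⟨ax, ay⟩, _ | ⟨⟨bx, b_y⟩, _ | ⟨⟨tx, ty⟩, _ | ⟨d, rest⟩⟩⟩⟩ <;> simp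
  cases (PySem.List.pyRange 0 101 1).foldl (fun mc a =>
      (PySem.List.pyRange 0 101 1).foldl (fun mc b =>
        if tx = ax * a + bx * b ∧ ty = ay * a + b_y * b then
          some (match mc with | none => 3 * a + b | some x => min x (3 * a + b))
        else mc) mc) (none : Option Int) <;> simp

lemma costFold_shift (M : List (List (Int × Int))) (c : Int) :
    M.foldl costStep c = c + M.foldl costStep 0 := by
  induction M generalizing c with
  | nil => simp
  | cons m M ih =>
    simp only [List.foldl_cons]
    rw [ih (costStep c m), ih (costStep 0 m), costStep_shift m c]
    ring

lemma pstep_acc (line : String) (ms : List (List (Int × Int))) (pend : List (Int × Int)) :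
    pstep (ms, pend) line =
      (ms ++ (pstep ([], pend) line).1, (pstep ([], pend) line).2) := by
  unfold pstep
  by_cases hB : PySem.Str.startswith (lineT line) "Button" = true <;>
    by_cases hP : PySem.Str.startswith (lineT line) "Prize" = true <;>
      simp only [Bool.not_eq_true] at hB hP <;> simp only [hB, hP] <;> simp

lemma parse_acc (lines : List String) (ms : List (List (Int × Int)))
    (pend : List (Int × Int)) :
    lines.foldl pstep (ms, pend) =
      (ms ++ (lines.foldl pstep ([], pend)).1, (lines.foldl pstep ([], pend)).2) := by
  induction lines generalizing ms pend with
  | nil => simp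
  | cons line rest ih =>
    simp only [List.foldl_cons]
    rw [pstep_acc line ms pend]
    rw [ih (ms ++ (pstep ([], pend) line).1) (pstep ([], pend) line).2,
        ih (pstep ([], pend) line).1 (pstep ([], pend) line).2]
    rcases pstep ([], pend) line with ⟨ms', pend'⟩
    simp

lemma main_aux (lines : List String) (c : Int) (pend : List (Int × Int))
    (hpre : preAux pend.length lines = true) :
    (lines.foldl bstep (c, pend)).1 =
      c + (lines.foldl pstep ([], pend)).1.foldl costStep 0 := by
  induction lines generalizing c pend with
  | nil => simp
  | cons line rest ih =>
    simp only [List.foldl_cons]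
    by_cases hB : PySem.Str.startswith (lineT line) "Button" = true
    · have hP := not_prize_of_button _ hB
      have hpre' : preAux (pend.length + 1) rest = true := by
        simp only [preAux, hB, if_true, Bool.and_eq_true] at hpre
        exact hpre.2
      have hbs : bstep (c, pend) line =
          (c, pend ++ [(tokInt (PySem.Str.split₀ (lineT line)) 3,
                        tokInt (PySem.Str.split₀ (lineT line)) 5)]) := by
        unfold bstep; simp only [hB, if_true]
      have hps : pstep ([], pend) line =
          ([], pend ++ [(tokInt (PySem.Str.split₀ (lineT line)) 3,
                         tokInt (PySem.Str.split₀ (lineT line)) 5)]) := by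
        unfold pstep; simp only [hB, hP, if_true, Bool.false_eq_true, if_false]
      rw [hbs, hps]
      exact ih c _ (by simpa using hpre')
    · by_cases hP : PySem.Str.startswith (lineT line) "Prize" = true
      · simp only [Bool.not_eq_true] at hB
        simp only [preAux, hB, hP, Bool.false_eq_true, if_false, if_true,
          Bool.and_eq_true] at hpre
        have hlen : pend.length = 2 := by simpa using hpre.1.2
        have hpre' : preAux 0 rest = true := hpre.2
        obtain ⟨p0, p1, rfl⟩ := List.length_eq_two.mp hlen
        have hg0 : (PySem.List.pyGet? [p0, p1] 0).getD ((0:Int), (0:Int)) = p0 := rfl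
        have hg1 : (PySem.List.pyGet? [p0, p1] 1).getD ((0:Int), (0:Int)) = p1 := rfl
        have hbs : bstep (c, [p0, p1]) line =
            (costStep c [p0, p1, (tokInt (PySem.Str.split₀ (lineT line)) 2,
                                  tokInt (PySem.Str.split₀ (lineT line)) 4)], []) := by
          unfold bstep
          simp only [hB, hP, Bool.false_eq_true, if_false, if_true, hg0, hg1]
          rw [machine_cost_eq]
        have hps : pstep ([], [p0, p1]) line =
            ([[p0, p1, (tokInt (PySem.Str.split₀ (lineT line)) 2,
                        tokInt (PySem.Str.split₀ (lineT line)) 4)]], []) := by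
          unfold pstep
          simp only [hB, hP, Bool.false_eq_true, if_false, if_true]
          simp
        rw [hbs, hps, parse_acc rest _ []]
        rw [ih (costStep c [p0, p1, (tokInt (PySem.Str.split₀ (lineT line)) 2,
              tokInt (PySem.Str.split₀ (lineT line)) 4)]) [] (by simpa using hpre')]
        simp only [List.cons_append, List.nil_append]
        rw [List.foldl_cons, costFold_shift _ (costStep 0 _), costStep_shift _ c]
        ring
      · simp only [Bool.not_eq_true] at hB hP
        have hpre' : preAux pend.length rest = true := by
          simpa only [preAux, hB, hP, Bool.false_eq_true, if_false] using hpre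
        have hbs : bstep (c, pend) line = (c, pend) := by
          unfold bstep; simp only [hB, hP, Bool.false_eq_true, if_false]
        have hps : pstep ([], pend) line = ([], pend) := by
          unfold pstep; simp only [hB, hP, Bool.false_eq_true, if_false]
        rw [hbs, hps]
        exact ih c pend hpre'

-- ===== VERDICT (by name: the statement is the Claim_ definition above) =====
theorem part_one_spec : Claim_equal_part_one := by
  intro input _ hpre
  unfold Spec_part_one
  rw [part_one_eq, parse_input_eq, part_one_alt_eq]
  rw [main_aux input 0 [] hpre]
  simp
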